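-- pv_equiv track=rewrite | github.com/Xrenya/Algorithms | Other/min_range.py | min_range_measure
-- ===== SOURCE A (Python) =====
-- def min_range_measure(string: str) -> int:
--     min_range = float("inf")
--     index = 0
--     last = None
--     for i, s in enumerate(string):
--         if last is None and (s == "x" or s == "y"):
--             last = s
--             index = i
--         elif s == last:
--             index = i
--             continue
--         elif s == "0":
--             continue
--         elif s != last and (s == "x" or s == "y"):
--             min_range = min(min_range, i - index)
--             last = s
--             index = i
--     return min_range if min_range != float("inf") else -1
-- ===== SOURCE B (Python) =====
-- def min_range_measure(string: str) -> int:
--     n = len(string)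
--     # prefix tables: last_x[i] / last_y[i] = last index of 'x' / 'y' in string[:i], or -1
--     last_x = [-1] * (n + 1)
--     last_y = [-1] * (n + 1)
--     for i, c in enumerate(string):
--         last_x[i + 1] = i if c == "x" else last_x[i]
--         last_y[i + 1] = i if c == "y" else last_y[i]
--     gaps = []
--     for i, c in enumerate(string):
--         if c == "x" and last_y[i] > last_x[i]:
--             gaps.append(i - last_y[i])
--         elif c == "y" and last_x[i] > last_y[i]:
--             gaps.append(i - last_x[i])
--     return min(gaps) if gaps else -1
-- ===== Notes on version B (the rewrite author's own statement) =====
-- stated objective: alternative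
-- what changed: Replaces A's single-pass four-branch state machine (tracking last marker char, its index and a running min) by a table-driven method: one pass precomputes last-occurrence prefix tables last_x/last_y, then a stateless scan reads the tables to collect every gap at a run boundary and takes their min.
import Mathlib
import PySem

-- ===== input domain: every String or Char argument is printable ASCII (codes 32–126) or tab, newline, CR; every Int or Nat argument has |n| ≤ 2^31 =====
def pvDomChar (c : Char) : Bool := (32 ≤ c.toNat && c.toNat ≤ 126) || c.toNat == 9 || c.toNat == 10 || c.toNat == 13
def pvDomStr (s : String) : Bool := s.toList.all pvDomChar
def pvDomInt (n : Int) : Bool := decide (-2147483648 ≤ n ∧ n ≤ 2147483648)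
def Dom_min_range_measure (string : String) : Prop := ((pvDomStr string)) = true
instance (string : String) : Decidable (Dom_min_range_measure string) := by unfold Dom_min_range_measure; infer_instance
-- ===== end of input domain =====

-- B replaces A's streaming state machine by two precomputed last-occurrence prefix tables
-- followed by a stateless scan that reads them (objective: alternative).

-- ===== PORT A =====
-- loop body of A: state = (min_range as Option Int (none = inf), index, last)
def pvStepA (st : Option Int × Int × Option Char) (p : Int × Char) :
    Option Int × Int × Option Char :=
  let i := p.1
  let s := p.2
  if st.2.2 = none ∧ (s = 'x' ∨ s = 'y') then (st.1, i, some s)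
  else if some s = st.2.2 then (st.1, i, st.2.2)
  else if s = '0' then st
  else if some s ≠ st.2.2 ∧ (s = 'x' ∨ s = 'y') then
    (some (match st.1 with | none => i - st.2.1 | some m => min m (i - st.2.1)), i, some s)
  else st

def min_range_measure (string : String) : Int :=
  let fin := (PySem.List.enumerate string.toList).foldl pvStepA (none, 0, none)
  match fin.1 with
  | some m => m
  | none => -1

-- ===== PORT B =====
-- Python preallocates last_x/last_y of length n+1 and fills slot i+1 reading slot i;
-- building the same lists slot by slot with append (reading entry i, the last one written) is exact.
def min_range_measure_alt (string : String) : Int :=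
  let e := PySem.List.enumerate string.toList
  let tabs := e.foldl (fun (t : List Int × List Int) p =>
      (t.1 ++ [if p.2 = 'x' then p.1 else PySem.List.pyGetD t.1 p.1 (-1)],
       t.2 ++ [if p.2 = 'y' then p.1 else PySem.List.pyGetD t.2 p.1 (-1)])) ([-1], [-1])
  let gaps := e.foldl (fun g p =>
      if p.2 = 'x' ∧ PySem.List.pyGetD tabs.2 p.1 (-1) > PySem.List.pyGetD tabs.1 p.1 (-1) then
        g ++ [p.1 - PySem.List.pyGetD tabs.2 p.1 (-1)]
      else if p.2 = 'y' ∧ PySem.List.pyGetD tabs.1 p.1 (-1) > PySem.List.pyGetD tabs.2 p.1 (-1) then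
        g ++ [p.1 - PySem.List.pyGetD tabs.1 p.1 (-1)]
      else g) []
  match PySem.List.min? gaps (fun g => g) with
  | some m => m
  | none => -1

-- ===== PRECONDITION & SPEC =====
def Spec_min_range_measure (string : String) (out : Int) : Prop := out = min_range_measure_alt string
instance (string : String) (out : Int) : Decidable (Spec_min_range_measure string out) := by unfold Spec_min_range_measure; infer_instance

-- ===== CLAIM (what is proved, stated in full; the proofs are below) =====
def Claim_equal_min_range_measure : Prop := ∀ (string : String), Dom_min_range_measure string → Spec_min_range_measure string (min_range_measure string)

-- ===== LEMMAS AND PROOFS =====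

-- the gap list over the x/y markers: adjacent differing pairs
def pvGaps (xs : List (Int × Char)) : List Int :=
  ((xs.zip (xs.drop 1)).filter (fun q => q.1.2 != q.2.2)).map (fun q => q.2.1 - q.1.1)

-- A's running minimum folded over a gap list
def pvCombine (mr : Option Int) (gs : List Int) : Option Int :=
  gs.foldl (fun acc g => some (match acc with | none => g | some m => min m g)) mr

-- invariant on A's state: last is none or an x/y character
def pvInv (st : Option Int × Int × Option Char) : Prop :=
  st.2.2 = none ∨ st.2.2 = some 'x' ∨ st.2.2 = some 'y'

theorem pvGaps_cons_cons (p q : Int × Char) (t : List (Int × Char)) :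
    pvGaps (p :: q :: t) =
      (if p.2 != q.2 then [q.1 - p.1] else []) ++ pvGaps (q :: t) := by
  simp only [pvGaps, List.drop_succ_cons, List.drop_zero, List.zip_cons_cons, List.filter_cons]
  split_ifs <;> simp_all

theorem pvStepA_skip (st : Option Int × Int × Option Char) (p : Int × Char)
    (hinv : pvInv st) (hp : ¬ (p.2 == 'x' || p.2 == 'y') = true) :
    pvStepA st p = st := by
  obtain ⟨mr, idx, last⟩ := st
  simp only [Bool.or_eq_true, beq_iff_eq, not_or] at hp
  obtain ⟨hx, hy⟩ := hp
  unfold pvStepA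
  rcases hinv with h | h | h <;> simp_all

theorem pvStepA_inv (st : Option Int × Int × Option Char) (p : Int × Char)
    (hinv : pvInv st) : pvInv (pvStepA st p) := by
  obtain ⟨mr, idx, last⟩ := st
  simp only [pvStepA]
  split_ifs with h1 h2 h3 h4
  · rcases h1.2 with h | h <;> simp [pvInv, h]
  · simp only [pvInv] at hinv ⊢; simpa using hinv
  · exact hinv
  · rcases h4.2 with h | h <;> simp [pvInv, h]
  · exact hinv

theorem pvFold_filter (l : List (Int × Char)) :
    ∀ st, pvInv st →
      l.foldl pvStepA st = (l.filter (fun p => p.2 == 'x' || p.2 == 'y')).foldl pvStepA st := by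
  induction l with
  | nil => intro st _; rfl
  | cons a t ih =>
    intro st hinv
    by_cases hp : (a.2 == 'x' || a.2 == 'y') = true
    · simp only [List.foldl_cons, List.filter_cons, hp, if_pos]
      exact ih _ (pvStepA_inv st a hinv)
    · simp only [List.foldl_cons, List.filter_cons, hp, if_neg, Bool.false_eq_true,
        not_false_eq_true, pvStepA_skip st a hinv hp]
      exact ih st hinv

theorem pvCombine_some (m : Int) (gs : List Int) :
    pvCombine (some m) gs = some (gs.foldl min m) := by
  induction gs generalizing m with
  | nil => rfl
  | cons g t ih => simpa [pvCombine, List.foldl_cons] using ih (min m g)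

theorem pvCombine_eq_min? (gs : List Int) :
    pvCombine none gs = PySem.List.min? gs (fun g => g) := by
  cases gs with
  | nil => rfl
  | cons g t =>
    rw [PySem.List.min?_id_cons]
    simpa [pvCombine] using pvCombine_some g t

-- the key invariant: folding A's step over an x/y list from a live state computes the gaps
theorem pvKey (xs : List (Int × Char)) :
    ∀ (mr : Option Int) (j : Int) (d : Char),
      (∀ p ∈ xs, (p.2 = 'x' ∨ p.2 = 'y')) → (d = 'x' ∨ d = 'y') →
      (xs.foldl pvStepA (mr, j, some d)).1 = pvCombine mr (pvGaps ((j, d) :: xs)) := by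
  induction xs with
  | nil => intro mr j d _ _; rfl
  | cons p t ih =>
    intro mr j d hmem hd
    obtain ⟨i, c⟩ := p
    have hc : c = 'x' ∨ c = 'y' := hmem (i, c) (by simp)
    have hmem' : ∀ q ∈ t, (q.2 = 'x' ∨ q.2 = 'y') := fun q hq => hmem q (by simp [hq])
    rw [pvGaps_cons_cons]
    by_cases hcd : c = d
    · subst hcd
      have hstep : pvStepA (mr, j, some c) (i, c) = (mr, i, some c) := by
        unfold pvStepA; simp
      simp only [List.foldl_cons, hstep, bne_self_eq_false, if_neg, Bool.false_eq_true,
        not_false_eq_true, List.nil_append]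
      exact ih mr i c hmem' hc
    · have hstep : pvStepA (mr, j, some d) (i, c) =
          (some (match mr with | none => i - j | some m => min m (i - j)), i, some c) := by
        unfold pvStepA
        have h0 : ¬ c = '0' := by rcases hc with h | h <;> simp [h]
        simp [hcd, hc, h0]
      have hbne : ((d : Char) != c) = true := by simp [bne_iff_ne]; exact fun h => hcd h.symm
      simp only [List.foldl_cons, hstep, hbne, if_pos, List.singleton_append]
      rw [ih _ i c hmem' hc]
      cases mr <;> simp [pvCombine]

-- A's value, characterised as the minimum of the adjacent-differing-marker gap list
theorem pvA_eq (string : String) :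
    min_range_measure string =
      (match PySem.List.min? (pvGaps ((PySem.List.enumerate string.toList).filter
          (fun p => p.2 == 'x' || p.2 == 'y'))) (fun g => g) with
       | some m => m
       | none => -1) := by
  simp only [min_range_measure]
  rw [pvFold_filter _ (none, 0, none) (by simp [pvInv])]
  have hmem : ∀ p ∈ (PySem.List.enumerate string.toList).filter
      (fun p => p.2 == 'x' || p.2 == 'y'), (p.2 = 'x' ∨ p.2 = 'y') := by
    intro p hp
    have := List.of_mem_filter hp
    simpa using this
  generalize hxs : (PySem.List.enumerate string.toList).filter
      (fun p => p.2 == 'x' || p.2 == 'y') = xs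
  rw [hxs] at hmem
  cases xs with
  | nil => rfl
  | cons p t =>
    obtain ⟨i, c⟩ := p
    have hc : c = 'x' ∨ c = 'y' := by
      have := hmem (i, c) (by simp)
      simpa using this
    have hstep : pvStepA (none, 0, none) (i, c) = (none, i, some c) := by
      unfold pvStepA; simp [hc]
    have hmem' : ∀ q ∈ t, (q.2 = 'x' ∨ q.2 = 'y') := by
      intro q hq; exact hmem q (by simp [hq])
    rw [List.foldl_cons, hstep, pvKey t none i c hmem' hc, pvCombine_eq_min?]

-- ==== B-side machinery ====

-- the tail of a last-occurrence table, one entry per processed (index, char)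
def pvTab (c : Char) : List (Int × Char) → Int → List Int
  | [], _ => []
  | (i, ch) :: t, a => (if ch = c then i else a) :: pvTab c t (if ch = c then i else a)

-- getD at the last slot of a list of known length is getLastD
theorem pvGetD_last (l : List Int) (m : Nat) (d : Int) (h : l.length = m + 1) :
    l.getD m d = l.getLastD d := by
  induction l generalizing m with
  | nil => simp at h
  | cons a t ih =>
    cases t with
    | nil =>
      have : m = 0 := by simpa using h
      simp [this]
    | cons b u =>
      cases m with
      | zero => simp at h
      | succ m' =>
        have h2 : (b :: u).length = m' + 1 := by simpa using h
        simpa [List.getD] using ih m' h2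

-- the table-building fold appends pvTab to the already-built prefix
theorem pvTab_foldl (cs : List Char) :
    ∀ (m : Nat) (lx ly : List Int), lx.length = m + 1 → ly.length = m + 1 →
      (PySem.List.enumerate cs (m : Int)).foldl
        (fun (t : List Int × List Int) p =>
          (t.1 ++ [if p.2 = 'x' then p.1 else PySem.List.pyGetD t.1 p.1 (-1)],
           t.2 ++ [if p.2 = 'y' then p.1 else PySem.List.pyGetD t.2 p.1 (-1)])) (lx, ly)
      = (lx ++ pvTab 'x' (PySem.List.enumerate cs (m : Int)) (lx.getLastD (-1)),
         ly ++ pvTab 'y' (PySem.List.enumerate cs (m : Int)) (ly.getLastD (-1))) := by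
  induction cs with
  | nil => intro m lx ly _ _; simp [pvTab]
  | cons c t ih =>
    intro m lx ly hx hy
    rw [PySem.List.enumerate_cons]
    have hgx : PySem.List.pyGetD lx (m : Int) (-1) = lx.getLastD (-1) := by
      rw [PySem.List.pyGetD_natCast]; exact pvGetD_last lx m _ hx
    have hgy : PySem.List.pyGetD ly (m : Int) (-1) = ly.getLastD (-1) := by
      rw [PySem.List.pyGetD_natCast]; exact pvGetD_last ly m _ hy
    have hcast : (m : Int) + 1 = ((m + 1 : Nat) : Int) := by push_cast; ring
    rw [List.foldl_cons]
    simp only [hgx, hgy]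
    rw [hcast, ih (m + 1) _ _ (by simp [hx]) (by simp [hy])]
    simp [pvTab, ← hcast]

-- reading the full table at slot k is the last occurrence among the first k entries
theorem pvTab_getD (c : Char) (l : List (Int × Char)) :
    ∀ (a : Int) (k : Nat) (d : Int), k ≤ l.length →
      PySem.List.pyGetD (a :: pvTab c l a) (k : Int) d
        = (l.take k).foldl (fun acc q => if q.2 = c then q.1 else acc) a := by
  induction l with
  | nil =>
    intro a k d hk
    have hk0 : k = 0 := by simp at hk; omega
    subst hk0
    simp [PySem.List.pyGetD_zero_cons]
  | cons p t ih =>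
    intro a k d hk
    obtain ⟨i, ch⟩ := p
    cases k with
    | zero => simp [PySem.List.pyGetD_zero_cons]
    | succ k' =>
      rw [PySem.List.pyGetD_natCast]
      have hk' : k' ≤ t.length := by simpa using hk
      have := ih (if ch = c then i else a) k' d hk'
      rw [PySem.List.pyGetD_natCast] at this
      simpa [pvTab, List.getD] using this

-- B's gap list, stated as a recursion threading the two "last seen" values
def pvGapsFrom : List (Int × Char) → Int → Int → List Int
  | [], _, _ => []
  | (i, c) :: t, a, b =>
    (if c = 'x' ∧ b > a then [i - b]
     else if c = 'y' ∧ a > b then [i - a]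
     else []) ++
    pvGapsFrom t (if c = 'x' then i else a) (if c = 'y' then i else b)

-- the second pass, with lookups abstracted as functions agreeing with the threaded values
theorem pvPass2 (l : List (Int × Char)) (fx fy : Int → Int) :
    ∀ (a b : Int) (g : List Int),
      (∀ (k : Nat) (hk : k < l.length),
          fx (l[k].1) = ((l.take k).foldl (fun acc q => if q.2 = 'x' then q.1 else acc) a)
        ∧ fy (l[k].1) = ((l.take k).foldl (fun acc q => if q.2 = 'y' then q.1 else acc) b)) →
      l.foldl (fun g p =>
          if p.2 = 'x' ∧ fy p.1 > fx p.1 then g ++ [p.1 - fy p.1]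
          else if p.2 = 'y' ∧ fx p.1 > fy p.1 then g ++ [p.1 - fx p.1]
          else g) g
      = g ++ pvGapsFrom l a b := by
  induction l with
  | nil => intro a b g _; simp [pvGapsFrom]
  | cons p t ih =>
    intro a b g H
    obtain ⟨i, c⟩ := p
    have h0 := H 0 (by simp)
    simp only [List.getElem_cons_zero, List.take_zero, List.foldl_nil] at h0
    obtain ⟨hfx, hfy⟩ := h0
    have H' : ∀ (k : Nat) (hk : k < t.length),
        fx (t[k].1) = ((t.take k).foldl (fun acc q => if q.2 = 'x' then q.1 else acc)
          (if c = 'x' then i else a))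
      ∧ fy (t[k].1) = ((t.take k).foldl (fun acc q => if q.2 = 'y' then q.1 else acc)
          (if c = 'y' then i else b)) := by
      intro k hk
      have := H (k + 1) (by simpa using Nat.succ_lt_succ hk)
      simpa [List.take_succ_cons] using this
    rw [List.foldl_cons, ih _ _ _ H']
    simp only [pvGapsFrom, hfx, hfy]
    split_ifs <;> simp_all
-- note: head chars: if c = 'x' the second condition (c = 'y' ∧ …) is impossible, handled by split_ifs

-- the virtual "previous marker" encoded by the two last-seen values
def pvMk (a b : Int) : List (Int × Char) :=
  if b < a then [(a, 'x')] else if a < b then [(b, 'y')] else []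

theorem pvGaps_short (l : List (Int × Char)) (h : l.length ≤ 1) : pvGaps l = [] := by
  match l, h with
  | [], _ => rfl
  | [p], _ => rfl

theorem pvGapsFrom_eq (l : List (Int × Char)) :
    ∀ (a b : Int),
      (∀ p ∈ l, a < p.1 ∧ b < p.1) → l.Pairwise (fun p q => p.1 < q.1) →
      pvGapsFrom l a b = pvGaps (pvMk a b ++ l.filter (fun p => p.2 == 'x' || p.2 == 'y')) := by
  induction l with
  | nil =>
    intro a b _ _
    refine (pvGaps_short _ ?_).symm
    simp only [List.filter_nil, List.append_nil, pvMk]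
    split_ifs <;> simp
  | cons p t ih =>
    intro a b hpos hsort
    obtain ⟨i, c⟩ := p
    have hia : a < i := (hpos (i, c) (by simp)).1
    have hib : b < i := (hpos (i, c) (by simp)).2
    have hpos' : ∀ q ∈ t, i < q.1 := by
      intro q hq; exact (List.pairwise_cons.mp hsort).1 q hq
    have hsort' : t.Pairwise (fun p q => p.1 < q.1) := (List.pairwise_cons.mp hsort).2
    by_cases hx : c = 'x'
    · subst hx
      have ht := ih i b
        (fun q hq => ⟨hpos' q hq, lt_trans hib (hpos' q hq)⟩) hsort'
      have hmk : pvMk i b = [(i, 'x')] := by simp [pvMk, hib]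
      rw [hmk, List.singleton_append] at ht
      have hL : pvGapsFrom ((i, 'x') :: t) a b
          = (if b > a then [i - b] else []) ++ pvGapsFrom t i b := by
        simp [pvGapsFrom]
      have hfc : List.filter (fun p => p.2 == 'x' || p.2 == 'y') ((i, 'x') :: t)
          = (i, 'x') :: List.filter (fun p => p.2 == 'x' || p.2 == 'y') t := by simp
      rw [hL, ht, hfc]
      rcases lt_trichotomy a b with h | h | h
      · have hmk2 : pvMk a b = [(b, 'y')] := by simp [pvMk, h, show ¬ b < a by omega]
        rw [hmk2, List.singleton_append, pvGaps_cons_cons]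
        simp [h]
      · subst h
        have hmk2 : pvMk a a = [] := by simp [pvMk]
        rw [hmk2, List.nil_append]
        simp
      · have hmk2 : pvMk a b = [(a, 'x')] := by simp [pvMk, h]
        rw [hmk2, List.singleton_append, pvGaps_cons_cons]
        simp [show ¬ b > a by omega]
    · by_cases hy : c = 'y'
      · subst hy
        have ht := ih a i
          (fun q hq => ⟨lt_trans hia (hpos' q hq), hpos' q hq⟩) hsort'
        have hmk : pvMk a i = [(i, 'y')] := by simp [pvMk, hia, show ¬ i < a by omega]
        rw [hmk, List.singleton_append] at ht
        have hL : pvGapsFrom ((i, 'y') :: t) a b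
            = (if a > b then [i - a] else []) ++ pvGapsFrom t a i := by
          simp [pvGapsFrom]
        have hfc : List.filter (fun p => p.2 == 'x' || p.2 == 'y') ((i, 'y') :: t)
            = (i, 'y') :: List.filter (fun p => p.2 == 'x' || p.2 == 'y') t := by simp
        rw [hL, ht, hfc]
        rcases lt_trichotomy a b with h | h | h
        · have hmk2 : pvMk a b = [(b, 'y')] := by simp [pvMk, h, show ¬ b < a by omega]
          rw [hmk2, List.singleton_append, pvGaps_cons_cons]
          simp [show ¬ a > b by omega]
        · subst h
          have hmk2 : pvMk a a = [] := by simp [pvMk]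
          rw [hmk2, List.nil_append]
          simp
        · have hmk2 : pvMk a b = [(a, 'x')] := by simp [pvMk, h]
          rw [hmk2, List.singleton_append, pvGaps_cons_cons]
          simp [h]
      · have hL : pvGapsFrom ((i, c) :: t) a b = pvGapsFrom t a b := by
          simp [pvGapsFrom, hx, hy]
        have hfc : List.filter (fun p => p.2 == 'x' || p.2 == 'y') ((i, c) :: t)
            = List.filter (fun p => p.2 == 'x' || p.2 == 'y') t := by simp [hx, hy]
        rw [hL, hfc, ih a b (fun q hq => hpos q (by simp [hq])) hsort']

-- B's value, characterised the same way
theorem pvAlt_eq (string : String) :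
    min_range_measure_alt string =
      (match PySem.List.min? (pvGaps ((PySem.List.enumerate string.toList).filter
          (fun p => p.2 == 'x' || p.2 == 'y'))) (fun g => g) with
       | some m => m
       | none => -1) := by
  simp only [min_range_measure_alt]
  have htab := pvTab_foldl string.toList 0 [-1] [-1] rfl rfl
  simp only [Nat.cast_zero] at htab
  rw [htab]
  set e := PySem.List.enumerate string.toList 0 with he
  set TX : List Int := [-1] ++ pvTab 'x' e (List.getLastD [-1] (-1)) with hTX
  set TY : List Int := [-1] ++ pvTab 'y' e (List.getLastD [-1] (-1)) with hTY
  have hTX' : TX = (-1) :: pvTab 'x' e (-1) := by simp [hTX]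
  have hTY' : TY = (-1) :: pvTab 'y' e (-1) := by simp [hTY]
  have H : ∀ (k : Nat) (hk : k < e.length),
      (fun i : Int => PySem.List.pyGetD TX i (-1)) (e[k].1)
        = ((e.take k).foldl (fun acc q => if q.2 = 'x' then q.1 else acc) (-1))
    ∧ (fun i : Int => PySem.List.pyGetD TY i (-1)) (e[k].1)
        = ((e.take k).foldl (fun acc q => if q.2 = 'y' then q.1 else acc) (-1)) := by
    intro k hk
    have hkn : k < string.toList.length := by
      simpa [he, PySem.List.length_enumerate] using hk
    have hek : e[k].1 = ((k : Nat) : Int) := by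
      have h1 : e[k]? = some ((0 : Int) + k, string.toList[k]) := by
        rw [he, PySem.List.getElem?_enumerate]
        simp [List.getElem?_eq_getElem hkn]
      have h2 : some e[k] = some ((0 : Int) + k, string.toList[k]) := by
        rw [← List.getElem?_eq_getElem hk, h1]
      rw [Option.some.inj h2]
      norm_num
    constructor
    · simp only [hek, hTX']
      exact pvTab_getD 'x' e (-1) k (-1) (le_of_lt hk)
    · simp only [hek, hTY']
      exact pvTab_getD 'y' e (-1) k (-1) (le_of_lt hk)
  have hpass := pvPass2 e (fun i : Int => PySem.List.pyGetD TX i (-1))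
      (fun i : Int => PySem.List.pyGetD TY i (-1)) (-1) (-1) [] H
  beta_reduce at hpass
  rw [hpass]
  have hpos : ∀ p ∈ e, (-1 : Int) < p.1 ∧ (-1 : Int) < p.1 := by
    intro p hp
    rw [he, PySem.List.mem_enumerate_iff] at hp
    obtain ⟨k, hk, rfl⟩ := hp
    constructor <;> simp <;> omega
  have hgf := pvGapsFrom_eq e (-1) (-1) hpos (PySem.List.pairwise_lt_enumerate _ _)
  have hmk : pvMk (-1) (-1) = [] := by simp [pvMk]
  rw [hmk, List.nil_append] at hgf
  rw [List.nil_append, hgf, he]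
-- ===== VERDICT (by name: the statement is the Claim_ definition above) =====
theorem min_range_measure_spec : Claim_equal_min_range_measure := by
  intro string _
  unfold Spec_min_range_measure
  rw [pvA_eq, pvAlt_eq]
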